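-- pv_equiv track=rewrite | github.com/Nikkuniku/AtcoderProgramming | ADT/20240530/f.py | f
-- ===== SOURCE A (Python) =====
-- def f(A):
--     M = len(A)
--     top = -1
--     left = -1
--     for i in range(M):
--         for j in range(M):
--             if A[i][j] == "#":
--                 top = i
--                 break
--         if top != -1:
--             break
--     for j in range(M):
--         for i in range(M):
--             if A[i][j] == "#":
--                 left = j
--                 break
--         if left != -1:
--             break
--     B = [["."] * M for _ in range(M)]
--     for i in range(top, M):
--         for j in range(left, M):
--             B[i - top][j - left] = A[i][j]
--
--     return B
-- ===== SOURCE B (Python) =====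
-- def f(A):
--     M = len(A)
--
--     def shift(G):
--         # drop the leading rows that contain no '#', pad with '.'-rows at the bottom
--         k = next(i for i, r in enumerate(G) if "#" in r)
--         return G[k:] + [["."] * M for _ in range(k)]
--
--     up = shift([row[:M] for row in A])
--     return [list(r) for r in zip(*shift([list(c) for c in zip(*up)]))]
-- ===== Notes on version B (the rewrite author's own statement) =====
-- stated objective: alternative
-- what changed: Instead of computing top/left offsets and copying cells by index arithmetic into a pre-filled grid, B defines one row-level operation 'drop the leading hash-free rows and pad with dot rows at the bottom' and applies it twice -- once to the rows, and once to the columns by transposing, shifting, and transposing back.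
import Mathlib
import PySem

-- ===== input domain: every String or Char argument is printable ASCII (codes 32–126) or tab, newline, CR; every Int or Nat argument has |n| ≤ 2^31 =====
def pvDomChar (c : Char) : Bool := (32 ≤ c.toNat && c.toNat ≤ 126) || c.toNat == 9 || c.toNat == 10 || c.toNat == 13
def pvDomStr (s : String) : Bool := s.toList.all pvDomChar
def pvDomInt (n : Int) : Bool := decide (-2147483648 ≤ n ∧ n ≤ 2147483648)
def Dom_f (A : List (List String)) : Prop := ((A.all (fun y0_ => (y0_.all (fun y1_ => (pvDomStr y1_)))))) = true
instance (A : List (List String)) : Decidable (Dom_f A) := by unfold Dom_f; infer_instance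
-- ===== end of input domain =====

-- B replaces A's offset-finding scans and index-arithmetic copy by one row-level operation —
-- "drop the leading hash-free rows, pad with dot rows" — applied to the rows and then to the
-- columns via transpose/shift/transpose (objective: alternative decomposition, same cost).

-- ===== PORT A =====
-- A[i][j] as Python evaluates it; the .getD "" default is only reached where Python raises
-- IndexError (outside Pre_f), so it is exact on Pre_f.
def gridGet (A : List (List String)) (i j : Int) : String :=
  ((PySem.List.pyGet? A i).bind (fun row => PySem.List.pyGet? row j)).getD ""

-- inner 'for j … if A[i][j]=="#": top=i; break' of A's first scan (observable effect: does row i hold '#')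
def rowHasHash (A : List (List String)) (M i : Nat) : Bool :=
  (List.range M).any (fun j => gridGet A i j == "#")

-- inner 'for i … if A[i][j]=="#": left=j; break' of A's second scan
def colHasHash (A : List (List String)) (M j : Nat) : Bool :=
  (List.range M).any (fun i => gridGet A i j == "#")

-- A's first loop: scan rows in order, stop at the first row containing '#', else -1
def topLoop (A : List (List String)) (M i : Nat) : Int :=
  if _h : i < M then
    (if rowHasHash A M i then (i : Int) else topLoop A M (i + 1))
  else -1
termination_by M - i
decreasing_by omega

-- A's second loop: scan columns in order
def leftLoop (A : List (List String)) (M j : Nat) : Int :=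
  if _h : j < M then
    (if colHasHash A M j then (j : Int) else leftLoop A M (j + 1))
  else -1
termination_by M - j

-- B[r][c] = v; exact for nonnegative in-range indices, the only case reached on Pre_f inputs
-- (on other inputs Python's f raises before returning)
def gridSet (B : List (List String)) (r c : Int) (v : String) : List (List String) :=
  if 0 ≤ r ∧ 0 ≤ c then B.modify r.toNat (fun row => row.set c.toNat v) else B

def f (A : List (List String)) : List (List String) :=
  let M := A.length
  let top := topLoop A M 0
  let left := leftLoop A M 0
  let B0 := List.replicate M (List.replicate M ".")
  (PySem.List.pyRange top (M : Int) 1).foldl (fun B i =>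
    (PySem.List.pyRange left (M : Int) 1).foldl (fun B j =>
      gridSet B (i - top) (j - left) (gridGet A i j)) B) B0

-- ===== PORT B =====
-- next(i for i, r in enumerate(G) if "#" in r) as structural recursion; when no row contains
-- '#' Python raises StopIteration — that happens only outside Pre_f (no '#' at all), where the
-- port's value (the list's length) is never relied on
def firstHashIdx : List (List String) → Nat
  | [] => 0
  | r :: G => if r.contains "#" then 0 else firstHashIdx G + 1

-- Source B's shift: G[k:] + k dot rows
def shiftUp (M : Nat) (G : List (List String)) : List (List String) :=
  let k := firstHashIdx G
  G.drop k ++ List.replicate k (List.replicate M ".")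

-- [list(c) for c in zip(*G)]; exact when G is M rows of length M, the only shape reached on
-- Pre_f inputs (the .getD "" default is never hit there)
def transposeM (M : Nat) (G : List (List String)) : List (List String) :=
  (List.range M).map (fun j => G.map (fun row => row.getD j ""))

def f_alt (A : List (List String)) : List (List String) :=
  let M := A.length
  let up := shiftUp M (A.map (fun row => row.take M))   -- row[:M]: exact, M = len(A) ≥ 0
  transposeM M (shiftUp M (transposeM M up))

-- ===== PRECONDITION & SPEC =====
-- Pre_f = exactly the inputs on which Python's f returns: every row at least M = len(A) cells long
-- (a shorter row is indexed out of range by a scan or by the copy loop → IndexError) and at least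
-- one '#' in the M×M region (otherwise top = left = -1 and the copy loop indexes B out of range
-- → IndexError).
def Pre_f (A : List (List String)) : Prop :=
  (∀ row ∈ A, A.length ≤ row.length) ∧
  ∃ i < A.length, ∃ j < A.length, (A.getD i []).getD j "" = "#"
instance (A : List (List String)) : Decidable (Pre_f A) := by unfold Pre_f; infer_instance

def pvWitness_f : List (List String) := [[".", "."], ["#", "."]]

def Spec_f (A : List (List String)) (out : List (List String)) : Prop := out = f_alt A
instance (A : List (List String)) (out : List (List String)) : Decidable (Spec_f A out) := by unfold Spec_f; infer_instance

-- ===== CLAIM (what is proved, stated in full; the proofs are below) =====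
def Claim_equal_f : Prop := ∀ (A : List (List String)), Dom_f A → Pre_f A → Spec_f A (f A)

-- ===== LEMMAS AND PROOFS =====

theorem gridGet_natCast (A : List (List String)) (i j : Nat) :
    gridGet A i j = (A.getD i []).getD j "" := by
  simp only [gridGet, PySem.List.pyGet?_natCast]
  cases h : A[i]? with
  | none =>
      simp [h]
  | some row =>
      have h2 : A.getD i [] = row := by simp [List.getD_eq_getElem?_getD, h]
      simp only [h2, Option.bind_some]
      cases hr : row[j]? <;> simp [hr]

theorem rowHasHash_iff (A : List (List String)) (M i : Nat) :
    rowHasHash A M i = true ↔ ∃ j < M, gridGet A i j = "#" := by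
  simp [rowHasHash, List.any_eq_true, List.mem_range]

theorem colHasHash_iff (A : List (List String)) (M j : Nat) :
    colHasHash A M j = true ↔ ∃ i < M, gridGet A i j = "#" := by
  simp [colHasHash, List.any_eq_true, List.mem_range]

theorem topLoop_eq (A : List (List String)) (M t : Nat) (htM : t < M)
    (ht : rowHasHash A M t = true) (hmin : ∀ i, i < t → rowHasHash A M i = false) :
    ∀ k, k ≤ t → topLoop A M k = t := by
  intro k hk
  induction hn : t - k generalizing k with
  | zero =>
      have : k = t := by omega
      subst this
      rw [topLoop]; simp [htM, ht]
  | succ n ih =>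
      have hkM : k < M := by omega
      have hkf : rowHasHash A M k = false := hmin k (by omega)
      rw [topLoop]; simp [hkM, hkf]
      exact ih (k + 1) (by omega) (by omega)

theorem leftLoop_eq (A : List (List String)) (M l : Nat) (hlM : l < M)
    (hl : colHasHash A M l = true) (hmin : ∀ j, j < l → colHasHash A M j = false) :
    ∀ k, k ≤ l → leftLoop A M k = l := by
  intro k hk
  induction hn : l - k generalizing k with
  | zero =>
      have : k = l := by omega
      subst this
      rw [leftLoop]; simp [hlM, hl]
  | succ n ih =>
      have hkM : k < M := by omega
      have hkf : colHasHash A M k = false := hmin k (by omega)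
      rw [leftLoop]; simp [hkM, hkf]
      exact ih (k + 1) (by omega) (by omega)

theorem modify_id (B : List (List String)) (r : Nat) :
    B.modify r (fun row => row) = B := by
  apply List.ext_getElem?
  intro n
  rw [List.getElem?_modify]
  cases B[n]? <;> simp

theorem foldl_set_length (g : Nat → String) (l : List Nat) (row : List String) :
    (l.foldl (fun row k => row.set k (g k)) row).length = row.length := by
  induction l generalizing row with
  | nil => rfl
  | cons a l ih => simp [List.foldl_cons, ih, List.length_set]

theorem foldl_set_get (g : Nat → String) (n : Nat) (row : List String) (c : Nat) :
    ((List.range n).foldl (fun row k => row.set k (g k)) row)[c]? =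
      if c < n ∧ c < row.length then some (g c) else row[c]? := by
  induction n with
  | zero => simp
  | succ n ih =>
      rw [List.range_succ, List.foldl_append]
      simp only [List.foldl_cons, List.foldl_nil]
      rw [List.getElem?_set]
      by_cases hc : n = c
      · subst hc
        rw [foldl_set_length]
        by_cases hlen : n < row.length
        · simp [hlen]
        · rw [ih]
          simp [hlen]
      · rw [if_neg hc, ih]
        by_cases h1 : c < n ∧ c < row.length
        · rw [if_pos h1, if_pos ⟨by omega, h1.2⟩]
        · have h2 : ¬ (c < n + 1 ∧ c < row.length) := by
            rintro ⟨ha, hb⟩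
            exact h1 ⟨by omega, hb⟩
          rw [if_neg h1, if_neg h2]

theorem foldl_modify_get (u : Nat → List String → List String) (m : Nat)
    (B : List (List String)) (r : Nat) :
    ((List.range m).foldl (fun B k => B.modify k (u k)) B)[r]? =
      if r < m then (B[r]?).map (u r) else B[r]? := by
  induction m with
  | zero => simp
  | succ m ih =>
      rw [List.range_succ, List.foldl_append]
      simp only [List.foldl_cons, List.foldl_nil]
      rw [List.getElem?_modify]
      by_cases hr : m = r
      · subst hr
        rw [ih]
        simp
      · rw [ih]
        by_cases h1 : r < m
        · simp only [if_pos h1, if_pos (show r < m + 1 by omega)]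
          cases B[r]? <;> simp [hr]
        · have h2 : ¬ r < m + 1 := by omega
          simp only [if_neg h1, if_neg h2]
          cases B[r]? <;> simp [hr]

-- the inner fold of gridSets at a fixed row r is one modify of row r
theorem foldl_modify_set (g : Nat → String) (r : Nat) (l : List Nat)
    (B : List (List String)) :
    (l.foldl (fun B k => B.modify r (fun row => row.set k (g k))) B) =
      B.modify r (fun row => l.foldl (fun row k => row.set k (g k)) row) := by
  induction l generalizing B with
  | nil => simp only [List.foldl_nil]; exact (modify_id B r).symm
  | cons a l ih =>
      simp only [List.foldl_cons]
      rw [ih, List.modify_modify_eq]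
      rfl

theorem gridSet_natCast (B : List (List String)) (r c : Nat) (v : String) :
    gridSet B (r : Int) (c : Int) v = B.modify r (fun row => row.set c v) := by
  simp [gridSet]

-- A's copy phase produces the closed map form
theorem grid_eq (A : List (List String)) (t l : Nat)
    (htM : t < A.length) (hlM : l < A.length) :
    ((PySem.List.pyRange (t : Int) (A.length : Int) 1).foldl (fun B i =>
      (PySem.List.pyRange (l : Int) (A.length : Int) 1).foldl (fun B j =>
        gridSet B (i - (t : Int)) (j - (l : Int)) (gridGet A i j)) B)
      (List.replicate A.length (List.replicate A.length "."))) =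
    (List.range A.length).map (fun (i : Nat) => (List.range A.length).map (fun (j : Nat) =>
      if (t : Int) + i < (A.length : Int) ∧ (l : Int) + j < (A.length : Int)
      then gridGet A ((t : Int) + i) ((l : Int) + j) else ".")) := by
  set M := A.length with hM
  have ht' : ((M : Int) - t).toNat = M - t := by omega
  have hl' : ((M : Int) - l).toNat = M - l := by omega
  simp only [PySem.List.pyRange_one]
  rw [ht', hl']
  simp only [List.foldl_map, add_sub_cancel_left, gridSet_natCast]
  simp only [foldl_modify_set]
  apply List.ext_getElem?
  intro r
  rw [foldl_modify_get]
  rw [List.getElem?_map]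
  by_cases hrM : r < M
  · rw [List.getElem?_range hrM, List.getElem?_replicate_of_lt hrM]
    by_cases hrt : r < M - t
    · simp only [if_pos hrt, Option.map_some]
      congr 1
      apply List.ext_getElem?
      intro c
      rw [foldl_set_get, List.getElem?_map, List.length_replicate]
      by_cases hcM : c < M
      · rw [List.getElem?_range hcM]
        have htr : (t : Int) + r < (M : Int) := by omega
        by_cases hcl : c < M - l
        · have hlc : (l : Int) + c < (M : Int) := by omega
          simp only [if_pos (And.intro hcl hcM), Option.map_some, if_pos (And.intro htr hlc)]
        · have hlc : ¬ ((l : Int) + c < (M : Int)) := by omega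
          rw [if_neg (by omega : ¬ (c < M - l ∧ c < M)), List.getElem?_replicate_of_lt hcM]
          simp [htr, hlc]
      · have h1 : ¬ (c < M - l ∧ c < M) := by omega
        rw [if_neg h1, List.getElem?_replicate, if_neg hcM]
        simp [hcM]
    · simp only [if_neg hrt]
      congr 1
      apply List.ext_getElem?
      intro c
      rw [List.getElem?_replicate, List.getElem?_map]
      by_cases hcM : c < M
      · rw [List.getElem?_range hcM, if_pos hcM]
        have : ¬ ((t : Int) + r < (M : Int)) := by omega
        simp [this]
      · simp [hcM]
  · have h1 : ¬ r < M - t := by omega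
    rw [if_neg h1, List.getElem?_replicate, if_neg hrM]
    simp [hrM]

-- ---- B-side lemmas ----

theorem firstHashIdx_spec (G : List (List String)) (k : Nat) (hk : k < G.length)
    (hc : (G.getD k []).contains "#" = true)
    (hmin : ∀ i, i < k → (G.getD i []).contains "#" = false) :
    firstHashIdx G = k := by
  induction G generalizing k with
  | nil => simp at hk
  | cons r G ih =>
      cases k with
      | zero =>
          simp only [List.getD_cons_zero] at hc
          simp only [firstHashIdx]
          rw [if_pos hc]
      | succ k =>
          have h0 : r.contains "#" = false := by
            have := hmin 0 (by omega)
            simpa using this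
          simp only [firstHashIdx]
          rw [if_neg (by rw [h0]; simp)]
          have : firstHashIdx G = k := by
            apply ih k (by simpa using hk)
            · simpa using hc
            · intro i hi
              have := hmin (i + 1) (by omega)
              simpa using this
          omega

-- the element grid as a map over ranges
def rowOf (A : List (List String)) (M i : Nat) : List String :=
  (List.range M).map (fun (j : Nat) => gridGet A (i : Int) (j : Int))

theorem rows_eq (A : List (List String)) (hlen : ∀ row ∈ A, A.length ≤ row.length) :
    A.map (fun row => row.take A.length) = (List.range A.length).map (rowOf A A.length) := by
  set M := A.length with hM
  apply List.ext_getElem?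
  intro i
  rw [List.getElem?_map, List.getElem?_map]
  by_cases hiM : i < M
  · rw [List.getElem?_range hiM]
    have hgi : A[i]? = some (A.getD i []) := by
      rw [List.getD_eq_getElem?_getD]
      cases h : A[i]? with
      | none => rw [List.getElem?_eq_none_iff] at h; omega
      | some row => simp
    rw [hgi]
    simp only [Option.map_some]
    rw [rowOf]
    congr 1
    have hrowlen : M ≤ (A.getD i []).length := by
      apply hlen
      exact List.mem_of_getElem? hgi
    apply List.ext_getElem?
    intro j
    rw [List.getElem?_take, List.getElem?_map]
    by_cases hjM : j < M
    · rw [if_pos hjM, List.getElem?_range hjM]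
      simp only [Option.map_some]
      rw [gridGet_natCast]
      cases h : (A.getD i [])[j]? with
      | none => rw [List.getElem?_eq_none_iff] at h; omega
      | some v =>
          rw [List.getD_eq_getElem?_getD, h]
          rfl
    · rw [if_neg hjM]
      have hn : (List.range M)[j]? = none := by
        rw [List.getElem?_eq_none_iff]; simpa using by omega
      rw [hn]
      simp
  · have hge : M ≤ i := by omega
    rw [List.getElem?_eq_none_iff.mpr (by simpa [hM] using hge),
        List.getElem?_eq_none_iff.mpr (by simpa using hge)]
    simp

theorem shiftUp_eval (f0 : Nat → List String) (M t : Nat) (htM : t ≤ M)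
    (hfi : firstHashIdx ((List.range M).map f0) = t) :
    shiftUp M ((List.range M).map f0) =
      (List.range M).map (fun i =>
        if t + i < M then f0 (t + i) else List.replicate M ".") := by
  unfold shiftUp
  rw [hfi]
  apply List.ext_getElem?
  intro n
  rw [List.getElem?_append]
  have hdl : (((List.range M).map f0).drop t).length = M - t := by simp
  by_cases hn1 : n < M - t
  · rw [if_pos (by omega)]
    rw [List.getElem?_drop, List.getElem?_map, List.getElem?_range (by omega)]
    rw [List.getElem?_map, List.getElem?_range (by omega : n < M)]
    simp only [Option.map_some]
    rw [if_pos (by omega)]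
  · rw [if_neg (by omega)]
    rw [hdl]
    by_cases hn2 : n < M
    · rw [List.getElem?_replicate_of_lt (by omega)]
      rw [List.getElem?_map, List.getElem?_range hn2]
      simp only [Option.map_some]
      rw [if_neg (by omega)]
    · rw [List.getElem?_replicate, if_neg (by omega)]
      symm
      rw [List.getElem?_eq_none_iff]
      simp
      omega

theorem transposeM_eval (f0 : Nat → List String) (M : Nat) :
    transposeM M ((List.range M).map f0) =
      (List.range M).map (fun j => (List.range M).map (fun i => (f0 i).getD j "")) := by
  simp [transposeM, List.map_map, Function.comp]

theorem contains_map_range (g : Nat → String) (M : Nat) :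
    ((List.range M).map g).contains "#" = true ↔ ∃ i < M, g i = "#" := by
  simp [List.mem_map, List.mem_range]

-- main B-side characterisation
theorem f_alt_eq (A : List (List String)) (t l : Nat)
    (hlen : ∀ row ∈ A, A.length ≤ row.length)
    (htM : t < A.length) (hlM : l < A.length)
    (ht : rowHasHash A A.length t = true)
    (htmin : ∀ i, i < t → rowHasHash A A.length i = false)
    (hl : colHasHash A A.length l = true)
    (hlmin : ∀ j, j < l → colHasHash A A.length j = false) :
    f_alt A = (List.range A.length).map (fun (i : Nat) =>
      (List.range A.length).map (fun (j : Nat) =>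
        if (t : Int) + i < (A.length : Int) ∧ (l : Int) + j < (A.length : Int)
        then gridGet A ((t : Int) + i) ((l : Int) + j) else ".")) := by
  set M := A.length with hM
  -- no '#' in rows before t, anywhere in the M×M block
  have hnot : ∀ i j : Nat, i < t → j < M → gridGet A i j ≠ "#" := by
    intro i j hi hj h
    have := (rowHasHash_iff A M i).mpr ⟨j, hj, h⟩
    rw [htmin i hi] at this
    exact Bool.false_ne_true this
  -- step 1: rows
  have hrows := rows_eq A hlen
  -- step 2: first hash row of the row grid is t
  have hcontains_row : ∀ i, (rowOf A M i).contains "#" = true ↔ ∃ j < M, gridGet A (i : Int) (j : Int) = "#" := by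
    intro i; rw [rowOf]; exact contains_map_range _ M
  have hfi1 : firstHashIdx ((List.range M).map (rowOf A M)) = t := by
    apply firstHashIdx_spec _ t (by simpa using htM)
    · have hg : ((List.range M).map (rowOf A M)).getD t [] = rowOf A M t := by
        rw [List.getD_eq_getElem?_getD, List.getElem?_map, List.getElem?_range htM]; rfl
      rw [hg]
      exact (hcontains_row t).mpr ((rowHasHash_iff A M t).mp ht)
    · intro i hi
      have hg : ((List.range M).map (rowOf A M)).getD i [] = rowOf A M i := by
        rw [List.getD_eq_getElem?_getD, List.getElem?_map, List.getElem?_range (by omega)]; rfl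
      rw [hg]
      rw [Bool.eq_false_iff]
      intro hcon
      obtain ⟨j, hj, hh⟩ := (hcontains_row i).mp hcon
      exact hnot i j hi hj hh
  -- up
  have hup : shiftUp M ((List.range M).map (rowOf A M)) =
      (List.range M).map (fun i => if t + i < M then rowOf A M (t + i) else List.replicate M ".") :=
    shiftUp_eval _ M t (by omega) hfi1
  -- the column grid
  set colF : Nat → List String :=
    fun j => (List.range M).map (fun (i : Nat) => if t + i < M then gridGet A ((t + i : Nat) : Int) (j : Int) else ".") with hcolF
  -- transpose of up: column j
  have hcol : ∀ j, j < M → ((List.range M).map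
        (fun i => ((if t + i < M then rowOf A M (t + i) else List.replicate M ".").getD j ""))) =
      colF j := by
    intro j hj
    rw [hcolF]
    apply List.map_congr_left
    intro i hi
    rw [List.mem_range] at hi
    by_cases h : t + i < M
    · rw [if_pos h, if_pos h]
      simp [rowOf, List.getD_eq_getElem?_getD, hj]
    · rw [if_neg h, if_neg h, List.getD_eq_getElem?_getD, List.getElem?_replicate_of_lt hj]
      rfl
  have htr1 : transposeM M (shiftUp M ((List.range M).map (rowOf A M))) =
      (List.range M).map colF := by
    rw [hup, transposeM_eval]
    apply List.map_congr_left
    intro j hj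
    rw [List.mem_range] at hj
    exact hcol j hj
  -- step 3: first hash column is l
  have hcontains_col : ∀ j, j < M → ((colF j).contains "#" = true ↔ ∃ i < M, gridGet A (i : Int) (j : Int) = "#") := by
    intro j hj
    rw [hcolF]
    rw [contains_map_range]
    constructor
    · rintro ⟨i, hi, h⟩
      by_cases hti : t + i < M
      · rw [if_pos hti] at h
        exact ⟨t + i, hti, h⟩
      · rw [if_neg hti] at h
        exact absurd h (by decide)
    · rintro ⟨i, hi, h⟩
      have hit : t ≤ i := by
        by_contra hlt
        exact hnot i j (by omega) hj h
      refine ⟨i - t, by omega, ?_⟩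
      rw [if_pos (by omega)]
      have : t + (i - t) = i := by omega
      rw [this]
      exact h
  have hfi2 : firstHashIdx ((List.range M).map colF) = l := by
    apply firstHashIdx_spec _ l (by simpa using hlM)
    · have hg : ((List.range M).map colF).getD l [] = colF l := by
        rw [List.getD_eq_getElem?_getD, List.getElem?_map, List.getElem?_range hlM]; rfl
      rw [hg]
      exact (hcontains_col l hlM).mpr ((colHasHash_iff A M l).mp hl)
    · intro j hj
      have hg : ((List.range M).map colF).getD j [] = colF j := by
        rw [List.getD_eq_getElem?_getD, List.getElem?_map, List.getElem?_range (by omega)]; rfl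
      rw [hg, Bool.eq_false_iff]
      intro hcon
      obtain ⟨i, hi, hh⟩ := (hcontains_col j (by omega)).mp hcon
      have := (colHasHash_iff A M j).mpr ⟨i, hi, hh⟩
      rw [hlmin j hj] at this
      exact Bool.false_ne_true this
  -- rt
  have hrt : shiftUp M ((List.range M).map colF) =
      (List.range M).map (fun j => if l + j < M then colF (l + j) else List.replicate M ".") :=
    shiftUp_eval _ M l (by omega) hfi2
  -- final transpose
  show f_alt A = _
  simp only [f_alt]
  rw [← hM, hrows, htr1, hrt, transposeM_eval]
  apply List.map_congr_left
  intro i hi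
  rw [List.mem_range] at hi
  apply List.map_congr_left
  intro j hj
  rw [List.mem_range] at hj
  by_cases hlj : l + j < M
  · rw [if_pos hlj]
    have hval : colF (l + j) = (List.range M).map
        (fun (i : Nat) => if t + i < M then gridGet A ((t + i : Nat) : Int) ((l + j : Nat) : Int) else ".") := by
      rw [hcolF]
    rw [hval, List.getD_eq_getElem?_getD, List.getElem?_map, List.getElem?_range hi]
    simp only [Option.map_some, Option.getD_some]
    by_cases hti : t + i < M
    · rw [if_pos hti, if_pos (by constructor <;> omega)]
      congr 1
    · rw [if_neg hti, if_neg (by omega)]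
  · rw [if_neg hlj, List.getD_eq_getElem?_getD, List.getElem?_replicate_of_lt hi]
    rw [if_neg (by omega)]
    rfl

theorem f_eq_f_alt (A : List (List String)) (hpre : Pre_f A) : f A = f_alt A := by
  obtain ⟨hrows, i0, hi0, j0, hj0, hcell⟩ := hpre
  set M := A.length with hM
  have hhash0 : gridGet A i0 j0 = "#" := by rw [gridGet_natCast]; exact hcell
  have hP : ∃ i, rowHasHash A M i = true :=
    ⟨i0, (rowHasHash_iff A M i0).mpr ⟨j0, hj0, hhash0⟩⟩
  have hQ : ∃ j, colHasHash A M j = true :=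
    ⟨j0, (colHasHash_iff A M j0).mpr ⟨i0, hi0, hhash0⟩⟩
  set t := Nat.find hP with hts
  set l := Nat.find hQ with hls
  have htP : rowHasHash A M t = true := Nat.find_spec hP
  have hlQ : colHasHash A M l = true := Nat.find_spec hQ
  have htmin : ∀ i, i < t → rowHasHash A M i = false := by
    intro i hi
    have := Nat.find_min hP hi
    simpa using this
  have hlmin : ∀ j, j < l → colHasHash A M j = false := by
    intro j hj
    have := Nat.find_min hQ hj
    simpa using this
  have htM : t < M := by
    have : t ≤ i0 := Nat.find_min' hP ((rowHasHash_iff A M i0).mpr ⟨j0, hj0, hhash0⟩)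
    omega
  have hlM : l < M := by
    have : l ≤ j0 := Nat.find_min' hQ ((colHasHash_iff A M j0).mpr ⟨i0, hi0, hhash0⟩)
    omega
  have htop : topLoop A M 0 = t := topLoop_eq A M t htM htP htmin 0 (Nat.zero_le t)
  have hleft : leftLoop A M 0 = l := leftLoop_eq A M l hlM hlQ hlmin 0 (Nat.zero_le l)
  have halt := f_alt_eq A t l hrows htM hlM htP htmin hlQ hlmin
  show f A = f_alt A
  rw [halt]
  simp only [f]
  rw [htop, hleft]
  exact grid_eq A t l htM hlM

-- ===== VERDICT (by name: the statement is the Claim_ definition above) =====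
theorem f_spec : Claim_equal_f := by
  intro A _hdom hpre
  unfold Spec_f
  exact f_eq_f_alt A hpre
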